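-- pv_equiv track=rewrite | github.com/lancelote/codechef_2017 | solutions/snakes_mongooses_and_election.py | election
-- ===== SOURCE A (Python) =====
-- def election(voters):
--     snakes = 0
--     mongooses = 0
--     free_snake = False
--     free_mongoose = False
--
--     for voter in voters:
--         if voter == 's':
--             if free_mongoose:
--                 free_mongoose = False
--             else:
--                 free_snake = True
--                 snakes += 1
--         else:
--             if free_snake:
--                 free_mongoose = False
--                 free_snake = False
--                 snakes -= 1
--             else:
--                 free_mongoose = True
--             mongooses += 1
--
--     if snakes > mongooses:
--         return 'snakes'
--     elif mongooses > snakes: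
--         return 'mongooses'
--     else:
--         return 'tie'
-- ===== SOURCE B (Python) =====
-- def election(voters):
--     # Greedy pairing: whenever the next two voters are a snake and a mongoose
--     # (in either order), the mongoose eats the snake and both are consumed;
--     # otherwise the first voter just casts its vote.
--     snakes = 0
--     mongooses = 0
--     i = 0
--     n = len(voters)
--     while i < n:
--         if i + 1 < n and (voters[i] == 's') != (voters[i + 1] == 's'):
--             mongooses += 1
--             i += 2
--         elif voters[i] == 's':
--             snakes += 1
--             i += 1
--         else:
--             mongooses += 1
--             i += 1
--     if snakes > mongooses:
--         return 'snakes'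
--     if mongooses > snakes:
--         return 'mongooses'
--     return 'tie'
-- ===== Notes on version B (the rewrite author's own statement) =====
-- stated objective: alternative
-- what changed: A's single-pass simulation with two pending-vote flags is replaced by a greedy two-voter lookahead: whenever the next two voters are a snake and a mongoose in either order, the mongoose eats the snake and both are consumed, otherwise the first voter just votes.
import Mathlib
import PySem

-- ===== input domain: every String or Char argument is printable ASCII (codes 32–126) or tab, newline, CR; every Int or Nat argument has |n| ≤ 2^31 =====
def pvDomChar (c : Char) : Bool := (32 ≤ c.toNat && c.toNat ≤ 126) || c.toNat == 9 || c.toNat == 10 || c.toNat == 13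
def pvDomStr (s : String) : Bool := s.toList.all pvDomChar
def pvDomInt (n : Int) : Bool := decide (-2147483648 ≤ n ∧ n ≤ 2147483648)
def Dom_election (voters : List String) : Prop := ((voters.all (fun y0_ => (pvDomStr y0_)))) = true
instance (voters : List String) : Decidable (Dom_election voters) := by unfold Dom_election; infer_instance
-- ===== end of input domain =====

-- B replaces A's two-flag vote simulation by a greedy two-voter lookahead pairing
-- (objective: alternative).

-- ===== PORT A =====
-- state: (snakes, mongooses, free_snake, free_mongoose)
def aStep (st : Int × Int × Bool × Bool) (voter : String) : Int × Int × Bool × Bool :=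
  if voter == "s" then
    if st.2.2.2 then (st.1, st.2.1, st.2.2.1, false)
    else (st.1 + 1, st.2.1, true, st.2.2.2)
  else
    if st.2.2.1 then (st.1 - 1, st.2.1 + 1, false, false)
    else (st.1, st.2.1 + 1, st.2.2.1, true)

def election (voters : List String) : String :=
  let st := voters.foldl aStep (0, 0, false, false)
  if st.1 > st.2.1 then "snakes"
  else if st.2.1 > st.1 then "mongooses"
  else "tie"

-- ===== PORT B =====
-- Source B's while loop over the index, as the same-state recursion on the remaining list:
-- a snake/mongoose pair (either order) yields one mongoose vote and consumes both voters.
def bLoop : List String → Int → Int → Int × Int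
  | v :: w :: rest, s, m =>
      if ((v == "s") != (w == "s")) then bLoop rest s (m + 1)
      else if v == "s" then bLoop (w :: rest) (s + 1) m
      else bLoop (w :: rest) s (m + 1)
  | [v], s, m => if v == "s" then (s + 1, m) else (s, m + 1)
  | [], s, m => (s, m)

def election_alt (voters : List String) : String :=
  let p := bLoop voters 0 0
  if p.1 > p.2 then "snakes"
  else if p.2 > p.1 then "mongooses"
  else "tie"

-- ===== PRECONDITION & SPEC =====
def Spec_election (voters : List String) (out : String) : Prop := out = election_alt voters
instance (voters : List String) (out : String) : Decidable (Spec_election voters out) := by unfold Spec_election; infer_instance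

-- ===== CLAIM =====
def Claim_equal_election : Prop := ∀ (voters : List String), Dom_election voters → Spec_election voters (election voters)

-- ===== LEMMAS AND PROOFS =====

-- Compatibility of A's flags with the head of the remaining input: a pending
-- mongoose is irrelevant before a mongoose, a pending snake irrelevant before a snake.
def Compat (vs : List String) (fs fm : Bool) : Prop :=
  ∀ v t, vs = v :: t → ((v == "s") = true → fm = false) ∧ ((v == "s") = false → fs = false)

lemma loop_inv (vs : List String) (a b : Int) (fs fm : Bool) (h : Compat vs fs fm) :
    (vs.foldl aStep (a, b, fs, fm)).1 = (bLoop vs a b).1 ∧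
    (vs.foldl aStep (a, b, fs, fm)).2.1 = (bLoop vs a b).2 := by
  induction vs, a, b using bLoop.induct generalizing fs fm with
  | case1 v w rest s m hx ih =>
      by_cases hv : (v == "s") = true
      · have hw : (w == "s") = false := by
          revert hx; cases hvs : (v == "s") <;> cases hws : (w == "s") <;> simp_all
        have hfm : fm = false := ((h v _ rfl).1) hv
        rw [show bLoop (v :: w :: rest) s m = bLoop rest s (m + 1) by
          rw [bLoop]; simp [hv, hw]]
        have : (v :: w :: rest).foldl aStep (s, m, fs, fm)
            = rest.foldl aStep (s, m + 1, false, false) := by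
          simp [List.foldl, aStep, hv, hw, hfm]
        rw [this]
        exact ih false false (fun v t ht => by simp)
      · have hw : (w == "s") = true := by
          revert hx; cases hvs : (v == "s") <;> cases hws : (w == "s") <;> simp_all
        have hfs : fs = false := ((h v _ rfl).2) (by simpa using hv)
        rw [show bLoop (v :: w :: rest) s m = bLoop rest s (m + 1) by
          rw [bLoop]; simp [hv, hw]]
        have : (v :: w :: rest).foldl aStep (s, m, fs, fm)
            = rest.foldl aStep (s, m + 1, false, false) := by
          simp [List.foldl, aStep, hv, hw, hfs]
        rw [this]
        exact ih false false (fun v t ht => by simp)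
  | case2 v w rest s m hx hv ih =>
      -- pair of equal kind, head is a snake
      have hw : (w == "s") = true := by
        revert hx; rw [hv]; cases hws : (w == "s") <;> simp_all
      have hfm : fm = false := ((h v _ rfl).1) hv
      rw [show bLoop (v :: w :: rest) s m = bLoop (w :: rest) (s + 1) m by
        rw [bLoop]; simp [hv, hw]]
      have : (v :: w :: rest).foldl aStep (s, m, fs, fm)
          = (w :: rest).foldl aStep (s + 1, m, true, false) := by
        simp [List.foldl, aStep, hv, hfm]
      rw [this]
      refine ih true false ?_
      intro v' t' ht
      injection ht with h1 h2
      subst h1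
      exact ⟨fun _ => rfl, fun hns => absurd hw (by simp [hns])⟩
  | case3 v w rest s m hx hv ih =>
      -- pair of equal kind, head is a mongoose
      have hv' : (v == "s") = false := by simpa using hv
      have hw : (w == "s") = false := by
        revert hx; rw [hv']; cases hws : (w == "s") <;> simp_all
      have hfs : fs = false := ((h v _ rfl).2) hv'
      rw [show bLoop (v :: w :: rest) s m = bLoop (w :: rest) s (m + 1) by
        rw [bLoop]; simp [hv', hw]]
      have : (v :: w :: rest).foldl aStep (s, m, fs, fm)
          = (w :: rest).foldl aStep (s, m + 1, false, true) := by
        simp [List.foldl, aStep, hv', hfs]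
      rw [this]
      refine ih false true ?_
      intro v' t' ht
      injection ht with h1 h2
      subst h1
      exact ⟨fun hsv => absurd hw (by simp [hsv]), fun _ => rfl⟩
  | case4 v s m hv =>
      have hfm : fm = false := (h v [] rfl).1 (by simp [hv])
      simp [bLoop, List.foldl, aStep, hv, hfm]
  | case5 v s m hv =>
      have hfs : fs = false := (h v [] rfl).2 (by simp [hv])
      simp [bLoop, List.foldl, aStep, hv, hfs]
  | case6 s m => simp [bLoop, List.foldl]

-- ===== VERDICT =====
theorem election_spec : Claim_equal_election := by
  intro voters _
  unfold Spec_election election election_alt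
  obtain ⟨h1, h2⟩ := loop_inv voters 0 0 false false (fun v t ht => by simp)
  simp only [h1, h2]
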